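-- pv_equiv track=rewrite | github.com/ZhongxiaYan/Project-Euler | 56.py | sum_digit
-- ===== SOURCE A (Python) =====
-- def place_counter(x):
--     place = 1
--     while x >= 10:
--         place, x = place + 1, x//10
--     return place
--
-- def sum_digit(x):
--     n = place_counter(x)
--     k = 0
--     result = 0
--     while k < n:
--         result = result + x // pow(10, k) % 10
--         k = k + 1
--     return result
-- ===== SOURCE B (Python) =====
-- def sum_digit(x):
--     total = 0
--     while x >= 10:
--         total += x % 10
--         x //= 10
--     return total + x % 10
-- ===== Notes on version B (the rewrite author's own statement) =====
-- stated objective: simpler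
-- what changed: Replaced the two-pass count-digits-then-index-with-pow approach by a single low-end digit-stripping loop accumulating x % 10 while x //= 10, stopping when x < 10 and adding the last x % 10.
import Mathlib
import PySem

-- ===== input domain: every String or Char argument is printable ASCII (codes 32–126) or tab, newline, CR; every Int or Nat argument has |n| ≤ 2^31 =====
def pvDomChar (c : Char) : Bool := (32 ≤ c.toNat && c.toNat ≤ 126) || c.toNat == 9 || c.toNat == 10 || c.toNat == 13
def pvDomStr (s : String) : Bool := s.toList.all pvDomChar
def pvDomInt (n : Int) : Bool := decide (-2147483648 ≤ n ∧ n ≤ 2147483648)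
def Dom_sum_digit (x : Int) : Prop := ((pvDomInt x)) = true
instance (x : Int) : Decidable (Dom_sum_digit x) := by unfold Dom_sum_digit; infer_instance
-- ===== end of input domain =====

-- B replaces A's count-then-index-with-pow approach by one digit-stripping loop (x % 10, x //= 10); simpler, same asymptotic cost.

-- termination measure shared by the loops (both ports cite it in decreasing_by)
theorem pvFloordivTenLt (x : Int) (h : 10 ≤ x) :
    (PySem.Int.floordiv x 10).toNat < x.toNat := by
  rw [PySem.Int.floordiv_eq_ediv_of_pos (by omega)]
  omega

-- ===== PORT A =====
-- while x >= 10: place, x = place + 1, x // 10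
def placeCounterLoop (place x : Int) : Int :=
  if 10 ≤ x then placeCounterLoop (place + 1) (PySem.Int.floordiv x 10) else place
termination_by x.toNat
decreasing_by exact pvFloordivTenLt x ‹10 ≤ x›

def place_counter (x : Int) : Int := placeCounterLoop 1 x

-- while k < n: result = result + x // pow(10, k) % 10; k = k + 1
def sum_digit (x : Int) : Int :=
  (List.range (place_counter x).toNat).foldl
    (fun result k => result + PySem.Int.mod (PySem.Int.floordiv x (10 ^ k)) 10) 0

-- ===== PORT B =====
-- while x >= 10: total += x % 10; x //= 10;  then return total + x % 10
def sumDigitAltLoop (total x : Int) : Int :=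
  if 10 ≤ x then sumDigitAltLoop (total + PySem.Int.mod x 10) (PySem.Int.floordiv x 10)
  else total + PySem.Int.mod x 10
termination_by x.toNat
decreasing_by exact pvFloordivTenLt x ‹10 ≤ x›

def sum_digit_alt (x : Int) : Int := sumDigitAltLoop 0 x

-- ===== PRECONDITION & SPEC =====
def Spec_sum_digit (x : Int) (out : Int) : Prop := out = sum_digit_alt x
instance (x : Int) (out : Int) : Decidable (Spec_sum_digit x out) := by unfold Spec_sum_digit; infer_instance

-- ===== CLAIM (what is proved, stated in full; the proofs are below) =====
def Claim_equal_sum_digit : Prop := ∀ (x : Int), Dom_sum_digit x → Spec_sum_digit x (sum_digit x)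

-- ===== LEMMAS AND PROOFS =====

-- the accumulator of A's place loop only shifts the result
theorem placeCounterLoop_shift (place x : Int) :
    placeCounterLoop place x = place - 1 + placeCounterLoop 1 x := by
  by_cases h : 10 ≤ x
  · rw [placeCounterLoop, if_pos h]
    conv_rhs => rw [placeCounterLoop, if_pos h]
    rw [placeCounterLoop_shift (place + 1), placeCounterLoop_shift (1 + 1)]
    ring
  · rw [placeCounterLoop, if_neg h]
    conv_rhs => rw [placeCounterLoop, if_neg h]
    ring
termination_by x.toNat
decreasing_by all_goals exact pvFloordivTenLt x ‹10 ≤ x›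

theorem place_counter_lt (x : Int) (h : ¬ 10 ≤ x) : place_counter x = 1 := by
  rw [place_counter, placeCounterLoop, if_neg h]

theorem place_counter_step (x : Int) (h : 10 ≤ x) :
    place_counter x = place_counter (PySem.Int.floordiv x 10) + 1 := by
  rw [place_counter, placeCounterLoop, if_pos h,
    placeCounterLoop_shift (1 + 1) (PySem.Int.floordiv x 10)]
  rw [place_counter]
  ring

theorem place_counter_pos (x : Int) : 1 ≤ place_counter x := by
  by_cases h : 10 ≤ x
  · rw [place_counter_step x h]
    have := place_counter_pos (PySem.Int.floordiv x 10)
    omega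
  · rw [place_counter_lt x h]
termination_by x.toNat
decreasing_by exact pvFloordivTenLt x ‹10 ≤ x›

-- pull an initial accumulator out of A's summation fold
theorem foldl_add_init (f : Nat → Int) (a : Int) (l : List Nat) :
    l.foldl (fun r k => r + f k) a = a + l.foldl (fun r k => r + f k) 0 := by
  induction l generalizing a with
  | nil => simp
  | cons h t ih =>
    simp only [List.foldl_cons]
    rw [ih (a + f h), ih (0 + f h)]
    ring

theorem floordiv_floordiv (x : Int) (k : Nat) :
    PySem.Int.floordiv (PySem.Int.floordiv x 10) (10 ^ k) =
      PySem.Int.floordiv x (10 ^ (k + 1)) := by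
  rw [PySem.Int.floordiv_eq_ediv_of_pos (b := 10) (by omega),
    PySem.Int.floordiv_eq_ediv_of_pos (by positivity),
    PySem.Int.floordiv_eq_ediv_of_pos (by positivity),
    Int.ediv_ediv_of_nonneg (by omega : (0:Int) ≤ 10), pow_succ, mul_comm]

-- one step of A's digit sum: the k = 0 term is x % 10 and the rest is the sum for x // 10
theorem sumA_step (x : Int) (n : Nat) :
    (List.range (n + 1)).foldl
        (fun r k => r + PySem.Int.mod (PySem.Int.floordiv x (10 ^ k)) 10) 0 =
      PySem.Int.mod x 10 +
        (List.range n).foldl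
          (fun r k => r + PySem.Int.mod (PySem.Int.floordiv (PySem.Int.floordiv x 10) (10 ^ k)) 10) 0 := by
  rw [List.range_succ_eq_map]
  simp only [List.foldl_cons, List.foldl_map]
  rw [foldl_add_init]
  have h0 : PySem.Int.floordiv x (10 ^ (0:Nat)) = x := by
    rw [PySem.Int.floordiv_eq_ediv_of_pos (by norm_num)]
    simp
  rw [h0]
  congr 1
  · omega
  · apply PySem.List.foldl_congr_mem
    intro r k _
    rw [floordiv_floordiv]

theorem altLoop_eq (x total : Int) : sumDigitAltLoop total x = total + sum_digit x := by
  rw [sumDigitAltLoop]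
  split
  · next h =>
    rw [altLoop_eq (PySem.Int.floordiv x 10) (total + PySem.Int.mod x 10)]
    have hn : (place_counter x).toNat = (place_counter (PySem.Int.floordiv x 10)).toNat + 1 := by
      have h1 := place_counter_step x h
      have h2 := place_counter_pos (PySem.Int.floordiv x 10)
      omega
    simp only [sum_digit]
    rw [hn, sumA_step]
    ring
  · next h =>
    have hn : (place_counter x).toNat = 1 := by rw [place_counter_lt x h]; rfl
    simp only [sum_digit]
    rw [hn]
    simp only [List.range_one, List.foldl_cons, List.foldl_nil]
    rw [PySem.Int.floordiv_eq_ediv_of_pos (b := (10:Int) ^ (0:Nat)) (by norm_num)]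
    simp
termination_by x.toNat
decreasing_by exact pvFloordivTenLt x ‹10 ≤ x›

-- ===== VERDICT (by name: the statement is the Claim_ definition above) =====
theorem sum_digit_spec : Claim_equal_sum_digit := by
  intro x _
  unfold Spec_sum_digit sum_digit_alt
  rw [altLoop_eq]
  ring
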